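-- pv_equiv track=rewrite | github.com/aonanj/drawing-agent | src/training/img_norm.py | cluster_by_axis
-- ===== SOURCE A (Python) =====
-- def cluster_by_axis(vals, tol):
--     """
--     Simple 1D clustering. vals: list of ints. tol: max gap to join.
--     Returns list of clusters, each is list of indices into the original list.
--     """
--     if not vals:
--         return []
--     order = sorted(range(len(vals)), key=lambda i: vals[i])
--     clusters, cur = [], [order[0]]
--     for idx in order[1:]:
--         if abs(vals[idx] - vals[cur[-1]]) <= tol:
--             cur.append(idx)
--         else:
--             clusters.append(cur)
--             cur = [idx]
--     clusters.append(cur)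
--     return clusters
-- ===== SOURCE B (Python) =====
-- def cluster_by_axis(vals, tol):
--     """Cut-list decomposition: sort indices by value, list the gap positions
--     where adjacent sorted values differ by more than tol, then slice the
--     sorted index list at those cut positions."""
--     if not vals:
--         return []
--     order = sorted(range(len(vals)), key=lambda i: vals[i])
--     n = len(order)
--     cuts = [i for i in range(1, n) if abs(vals[order[i]] - vals[order[i - 1]]) > tol]
--     clusters, prev = [], 0
--     for c in cuts + [n]:
--         clusters.append(order[prev:c])
--         prev = c
--     return clusters
-- ===== Notes on version B (the rewrite author's own statement) =====
-- stated objective: alternative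
-- what changed: A builds clusters in one fold that flushes an accumulator at each large gap; B instead first computes the list of cut positions (sorted positions whose gap to the previous value exceeds tol) and then partitions the sorted index list by slicing between consecutive cut positions.
import Mathlib
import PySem

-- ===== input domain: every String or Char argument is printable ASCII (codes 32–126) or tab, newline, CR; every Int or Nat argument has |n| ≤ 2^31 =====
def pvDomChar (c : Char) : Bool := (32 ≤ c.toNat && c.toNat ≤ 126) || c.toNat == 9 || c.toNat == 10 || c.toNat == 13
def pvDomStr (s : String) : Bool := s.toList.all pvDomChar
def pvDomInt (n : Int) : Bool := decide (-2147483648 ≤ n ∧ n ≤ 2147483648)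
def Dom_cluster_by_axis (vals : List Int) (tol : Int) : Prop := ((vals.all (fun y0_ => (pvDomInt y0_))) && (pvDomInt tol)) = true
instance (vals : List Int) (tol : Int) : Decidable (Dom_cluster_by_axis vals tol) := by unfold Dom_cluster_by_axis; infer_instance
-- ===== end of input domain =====

-- B replaces A's accumulator-flushing fold by a cut-position list plus slicing (alternative decomposition, same cost).
-- All vals[...]/order[...] indices below are in range by construction, so pyGetD with default 0 is exact.

-- ===== PORT A =====
def cluster_by_axis (vals : List Int) (tol : Int) : List (List Int) :=
  if vals = [] then []
  else
    let order := PySem.List.sorted (PySem.List.pyRange 0 (vals.length : Int) 1)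
      (fun i => PySem.List.pyGetD vals i 0) false
    let s := (PySem.List.slice order (some 1) none).foldl
      (fun (st : List (List Int) × List Int) idx =>
        if |PySem.List.pyGetD vals idx 0 - PySem.List.pyGetD vals (PySem.List.pyGetD st.2 (-1) 0) 0| ≤ tol
        then (st.1, st.2 ++ [idx])
        else (st.1 ++ [st.2], [idx]))
      (([] : List (List Int)), [PySem.List.pyGetD order 0 0])
    s.1 ++ [s.2]

-- ===== PORT B =====
def cluster_by_axis_alt (vals : List Int) (tol : Int) : List (List Int) :=
  if vals = [] then []
  else
    let order := PySem.List.sorted (PySem.List.pyRange 0 (vals.length : Int) 1)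
      (fun i => PySem.List.pyGetD vals i 0) false
    let n := (order.length : Int)
    let cuts := (PySem.List.pyRange 1 n 1).filter
      (fun i => decide (tol < |PySem.List.pyGetD vals (PySem.List.pyGetD order i 0) 0 -
                              PySem.List.pyGetD vals (PySem.List.pyGetD order (i - 1) 0) 0|))
    let s := (cuts ++ [n]).foldl
      (fun (st : List (List Int) × Int) c =>
        (st.1 ++ [PySem.List.slice order (some st.2) (some c)], c))
      (([] : List (List Int)), (0 : Int))
    s.1

-- ===== PRECONDITION & SPEC =====
def Spec_cluster_by_axis (vals : List Int) (tol : Int) (out : List (List Int)) : Prop := out = cluster_by_axis_alt vals tol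
instance (vals : List Int) (tol : Int) (out : List (List Int)) : Decidable (Spec_cluster_by_axis vals tol out) := by unfold Spec_cluster_by_axis; infer_instance

-- ===== CLAIM (what is proved, stated in full; the proofs are below) =====
def Claim_equal_cluster_by_axis : Prop := ∀ (vals : List Int) (tol : Int), Dom_cluster_by_axis vals tol → Spec_cluster_by_axis vals tol (cluster_by_axis vals tol)

-- ===== LEMMAS AND PROOFS =====

-- The current chunk continuation: pvGrp g tol p xs = (rest of the chunk started before p, remainder).
def pvGrp (g : Int → Int) (tol : Int) : Int → List Int → List Int × List Int
  | _, [] => ([], [])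
  | p, x :: xs =>
    if |g x - g p| ≤ tol then ((x :: (pvGrp g tol x xs).1), (pvGrp g tol x xs).2)
    else ([], x :: xs)

theorem pvGrp_snd_length (g : Int → Int) (tol : Int) :
    ∀ (p : Int) (xs : List Int), (pvGrp g tol p xs).2.length ≤ xs.length := by
  intro p xs
  induction xs generalizing p with
  | nil => simp [pvGrp]
  | cons x xs ih =>
    simp only [pvGrp]
    split
    · exact Nat.le_succ_of_le (ih x)
    · simp

-- Reference chunking: the common value both ports compute on the sorted list.
def pvSpec (g : Int → Int) (tol : Int) : List Int → List (List Int)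
  | [] => []
  | x :: xs => (x :: (pvGrp g tol x xs).1) :: pvSpec g tol (pvGrp g tol x xs).2
  termination_by l => l.length
  decreasing_by
    have := pvGrp_snd_length g tol x xs
    simp
    omega

theorem pvGrp_append (g : Int → Int) (tol : Int) :
    ∀ (p : Int) (xs : List Int), (pvGrp g tol p xs).1 ++ (pvGrp g tol p xs).2 = xs := by
  intro p xs
  induction xs generalizing p with
  | nil => simp [pvGrp]
  | cons x xs ih =>
    simp only [pvGrp]
    split
    · simpa using ih x
    · simp

theorem pvGrp_adjacent (g : Int → Int) (tol : Int) :
    ∀ (p : Int) (xs : List Int) (i : Nat) (h : i + 1 < (p :: (pvGrp g tol p xs).1).length),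
      |g ((p :: (pvGrp g tol p xs).1)[i + 1]'h) -
       g ((p :: (pvGrp g tol p xs).1)[i]'(by omega))| ≤ tol := by
  intro p xs
  induction xs generalizing p with
  | nil => intro i h; simp [pvGrp] at h
  | cons x xs ih =>
    simp only [pvGrp]
    split
    · rename_i hj
      intro i h
      match i with
      | 0 => simpa using hj
      | Nat.succ i =>
        have := ih x i (by simpa using h)
        simpa using this
    · intro i h; simp at h

theorem pvGrp_boundary (g : Int → Int) (tol : Int) :
    ∀ (p : Int) (xs : List Int) (y : Int) (ys : List Int),
      (pvGrp g tol p xs).2 = y :: ys →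
      ¬ |g y - g ((p :: (pvGrp g tol p xs).1).getLast (by simp))| ≤ tol := by
  intro p xs
  induction xs generalizing p with
  | nil => intro y ys h; simp [pvGrp] at h
  | cons x xs ih =>
    simp only [pvGrp]
    split
    · rename_i hj
      intro y ys h
      have := ih x y ys h
      rwa [List.getLast_cons (by simp)]
    · rename_i hj
      intro y ys h
      obtain ⟨rfl, rfl⟩ : x = y ∧ xs = ys := by simpa using h
      simpa using hj

-- ===== A side =====

theorem pvFoldA (g : Int → Int) (tol : Int) :
    ∀ (xs : List Int) (acc : List (List Int)) (cur : List Int) (h : cur ≠ []),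
      (let s := xs.foldl
        (fun (st : List (List Int) × List Int) idx =>
          if |g idx - g (PySem.List.pyGetD st.2 (-1) 0)| ≤ tol
          then (st.1, st.2 ++ [idx])
          else (st.1 ++ [st.2], [idx]))
        (acc, cur);
       s.1 ++ [s.2])
      = acc ++ (cur ++ (pvGrp g tol (cur.getLast h) xs).1)
              :: pvSpec g tol (pvGrp g tol (cur.getLast h) xs).2 := by
  intro xs
  induction xs with
  | nil => intro acc cur h; simp [pvGrp, pvSpec]
  | cons x xs ih =>
    intro acc cur h
    simp only [List.foldl_cons, PySem.List.pyGetD_neg_one cur 0 h, pvGrp]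
    by_cases hx : |g x - g (cur.getLast h)| ≤ tol
    · rw [if_pos hx]
      have := ih acc (cur ++ [x]) (by simp)
      simp only [List.getLast_concat] at this
      rw [this, if_pos hx]
      simp
    · rw [if_neg hx]
      have := ih (acc ++ [cur]) [x] (by simp)
      simp only [List.getLast_singleton] at this
      rw [this, if_neg hx]
      rw [pvSpec]
      simp

-- ===== B side =====

def pvPred (g : Int → Int) (tol : Int) (l : List Int) : Int → Bool :=
  fun i => decide (tol < |g (PySem.List.pyGetD l i 0) - g (PySem.List.pyGetD l (i - 1) 0)|)

def pvCuts (g : Int → Int) (tol : Int) (l : List Int) : List Int :=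
  (PySem.List.pyRange 1 (l.length : Int) 1).filter (pvPred g tol l)

def pvPart (l : List Int) (cuts : List Int) : List (List Int) :=
  ((cuts ++ [(l.length : Int)]).foldl
    (fun (st : List (List Int) × Int) c =>
      (st.1 ++ [PySem.List.slice l (some st.2) (some c)], c))
    (([] : List (List Int)), (0 : Int))).1

theorem pvGetD_append_shift (u r : List Int) (j : Int) (h0 : 0 ≤ j) (h1 : j < (r.length : Int)) :
    PySem.List.pyGetD (u ++ r) (j + (u.length : Int)) 0 = PySem.List.pyGetD r j 0 := by
  rw [PySem.List.pyGetD_eq_getElem _ _ (by omega)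
        (by simp only [List.length_append]; push_cast; omega),
      PySem.List.pyGetD_eq_getElem _ _ h0 h1]
  rw [List.getElem_append_right (by omega)]
  congr 1
  omega

theorem pvSliceShift (u r : List Int) (p c : Int) (hp : 0 ≤ p) (hc : 0 ≤ c) :
    PySem.List.slice (u ++ r) (some (p + (u.length : Int))) (some (c + (u.length : Int)))
      = PySem.List.slice r (some p) (some c) := by
  rw [PySem.List.slice_toNat _ (by omega) (by omega), PySem.List.slice_toNat _ hp hc]
  have h1 : (p + (u.length : Int)).toNat = u.length + p.toNat := by omega
  have h2 : (c + (u.length : Int)).toNat - (p + (u.length : Int)).toNat = c.toNat - p.toNat := by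
    omega
  rw [h2, h1, List.drop_append]
  have h3 : u.length + p.toNat - u.length = p.toNat := by omega
  rw [h3, List.drop_eq_nil_of_le (by omega), List.nil_append]

theorem pvFoldAcc (l : List Int) :
    ∀ (ds : List Int) (acc : List (List Int)) (p : Int),
      (ds.foldl (fun (st : List (List Int) × Int) c =>
          (st.1 ++ [PySem.List.slice l (some st.2) (some c)], c)) (acc, p)).1
      = acc ++ (ds.foldl (fun (st : List (List Int) × Int) c =>
          (st.1 ++ [PySem.List.slice l (some st.2) (some c)], c)) (([] : List (List Int)), p)).1 := by
  intro ds
  induction ds with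
  | nil => simp
  | cons d ds ih =>
    intro acc p
    simp only [List.foldl_cons, List.nil_append]
    rw [ih, ih [PySem.List.slice l (some p) (some d)]]
    simp

theorem pvFoldShift (u r : List Int) :
    ∀ (ds : List Int), (∀ d ∈ ds, 0 ≤ d) → ∀ (acc : List (List Int)) (p : Int), 0 ≤ p →
      ((ds.map (· + (u.length : Int))).foldl (fun (st : List (List Int) × Int) c =>
          (st.1 ++ [PySem.List.slice (u ++ r) (some st.2) (some c)], c)) (acc, p + (u.length : Int))).1
      = (ds.foldl (fun (st : List (List Int) × Int) c =>
          (st.1 ++ [PySem.List.slice r (some st.2) (some c)], c)) (acc, p)).1 := by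
  intro ds
  induction ds with
  | nil => intro _ acc p _; simp
  | cons d ds ih =>
    intro hnn acc p hp
    have hd : 0 ≤ d := hnn d (by simp)
    simp only [List.map_cons, List.foldl_cons]
    rw [pvSliceShift u r p d hp hd]
    exact ih (fun e he => hnn e (by simp [he])) _ d hd

theorem pvFoldShift0 (u r : List Int) (ds : List Int) (hnn : ∀ d ∈ ds, 0 ≤ d)
    (acc : List (List Int)) :
    ((ds.map (· + (u.length : Int))).foldl (fun (st : List (List Int) × Int) c =>
        (st.1 ++ [PySem.List.slice (u ++ r) (some st.2) (some c)], c)) (acc, ((u.length : Int)))).1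
    = (ds.foldl (fun (st : List (List Int) × Int) c =>
        (st.1 ++ [PySem.List.slice r (some st.2) (some c)], c)) (acc, 0)).1 := by
  have := pvFoldShift u r ds hnn acc 0 le_rfl
  simpa using this

theorem pvCutsDecomp (g : Int → Int) (tol : Int) (u r : List Int) (hu : u ≠ [])
    (hadj : ∀ (i : Nat) (h : i + 1 < u.length),
      |g (u[i + 1]'h) - g (u[i]'(by omega))| ≤ tol)
    (hbd : ∀ (y : Int) (ys : List Int), r = y :: ys → ¬ |g y - g (u.getLast hu)| ≤ tol) :
    pvCuts g tol (u ++ r) =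
      if r = [] then []
      else ((u.length : Int)) :: (pvCuts g tol r).map (· + (u.length : Int)) := by
  have hul : 0 < u.length := by
    cases u with
    | nil => exact absurd rfl hu
    | cons a t => exact Nat.succ_pos t.length
  unfold pvCuts
  have hlen : (((u ++ r).length : Int)) = (u.length : Int) + (r.length : Int) := by
    push_cast [List.length_append]; ring
  rw [hlen, PySem.List.pyRange_one_append 1 (u.length : Int) _ (by omega) (by omega),
      List.filter_append]
  have hfirst : (PySem.List.pyRange 1 (u.length : Int) 1).filter (pvPred g tol (u ++ r)) = [] := by
    apply List.filter_eq_nil_iff.mpr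
    intro i hi
    rw [PySem.List.mem_pyRange_one] at hi
    obtain ⟨k, rfl⟩ : ∃ k : Nat, i = (k : Int) := ⟨i.toNat, by omega⟩
    have hk1 : 1 ≤ k := by omega
    have hk2 : k < u.length := by omega
    simp only [pvPred, decide_eq_true_eq, not_lt]
    have e1 : PySem.List.pyGetD (u ++ r) (k : Int) 0 = u[k]'hk2 := by
      rw [PySem.List.pyGetD_eq_getElem _ _ (by omega) (by omega)]
      simp only [Int.toNat_natCast]
      exact List.getElem_append_left hk2
    have e2 : PySem.List.pyGetD (u ++ r) ((k : Int) - 1) 0 = u[k - 1]'(by omega) := by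
      have hc : (k : Int) - 1 = ((k - 1 : Nat) : Int) := by omega
      rw [hc, PySem.List.pyGetD_eq_getElem _ _ (by omega) (by omega)]
      simp only [Int.toNat_natCast]
      exact List.getElem_append_left (by omega)
    rw [e1, e2]
    have hk' : k - 1 + 1 = k := by omega
    have := hadj (k - 1) (by omega)
    simpa [hk'] using this
  rw [hfirst, List.nil_append]
  cases r with
  | nil => simp [PySem.List.pyRange_one_eq_nil]
  | cons y ys =>
    rw [if_neg (by simp)]
    have hrl : (1 : Int) ≤ ((y :: ys).length : Int) := by
      simp only [List.length_cons]
      push_cast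
      omega
    rw [PySem.List.pyRange_one_cons (by omega)]
    have hPm : pvPred g tol (u ++ y :: ys) ((u.length : Int)) = true := by
      simp only [pvPred, decide_eq_true_eq]
      have e1 : PySem.List.pyGetD (u ++ y :: ys) ((u.length : Int)) 0 = y := by
        rw [PySem.List.pyGetD_eq_getElem _ _ (by omega) (by omega)]
        simp only [Int.toNat_natCast]
        rw [List.getElem_append_right (by omega)]
        simp
      have e2 : PySem.List.pyGetD (u ++ y :: ys) ((u.length : Int) - 1) 0 = u.getLast hu := by
        have hc : (u.length : Int) - 1 = ((u.length - 1 : Nat) : Int) := by omega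
        rw [hc, PySem.List.pyGetD_eq_getElem _ _ (by omega) (by omega)]
        simp only [Int.toNat_natCast]
        rw [List.getElem_append_left (by omega), List.getLast_eq_getElem]
      rw [e1, e2]
      exact not_le.mp (hbd y ys rfl)
    rw [List.filter_cons_of_pos hPm]
    congr 1
    -- the remaining cut positions are those of r, shifted by u.length
    rw [PySem.List.pyRange_one ((u.length : Int) + 1), PySem.List.pyRange_one 1,
        List.filter_map, List.filter_map, List.map_map]
    have hN : ((u.length : Int) + ((y :: ys).length : Int) - ((u.length : Int) + 1)).toNat
        = (((y :: ys).length : Int) - 1).toNat := by omega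
    rw [hN]
    have hfc : ∀ k ∈ List.range (((y :: ys).length : Int) - 1).toNat,
        (pvPred g tol (u ++ y :: ys) ∘ fun (k : Nat) => (u.length : Int) + 1 + (k : Int)) k
          = (pvPred g tol (y :: ys) ∘ fun (k : Nat) => 1 + (k : Int)) k := by
      intro k hk
      rw [List.mem_range] at hk
      have hkr : (k : Int) + 1 < ((y :: ys).length : Int) := by
        simp at hk ⊢; omega
      simp only [Function.comp, pvPred]
      have e3 : PySem.List.pyGetD (u ++ y :: ys) ((u.length : Int) + 1 + (k : Int)) 0
          = PySem.List.pyGetD (y :: ys) (1 + (k : Int)) 0 := by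
        have hc : (u.length : Int) + 1 + (k : Int) = (1 + (k : Int)) + (u.length : Int) := by ring
        rw [hc, pvGetD_append_shift u (y :: ys) _ (by omega) (by omega)]
      have e4 : PySem.List.pyGetD (u ++ y :: ys) ((u.length : Int) + 1 + (k : Int) - 1) 0
          = PySem.List.pyGetD (y :: ys) (1 + (k : Int) - 1) 0 := by
        have hc : (u.length : Int) + 1 + (k : Int) - 1 = (1 + (k : Int) - 1) + (u.length : Int) := by
          ring
        rw [hc, pvGetD_append_shift u (y :: ys) _ (by omega) (by omega)]
      rw [e3, e4]
    rw [List.filter_congr hfc]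
    apply List.map_congr_left
    intro k _
    show (u.length : Int) + 1 + (k : Int) = 1 + (k : Int) + (u.length : Int)
    ring

theorem pvFoldB (g : Int → Int) (tol : Int) :
    ∀ (l : List Int), l ≠ [] → pvPart l (pvCuts g tol l) = pvSpec g tol l := by
  have key : ∀ (n : Nat) (l : List Int), l.length ≤ n → l ≠ [] →
      pvPart l (pvCuts g tol l) = pvSpec g tol l := by
    intro n
    induction n with
    | zero =>
      intro l hl hne
      cases l
      · exact absurd rfl hne
      · simp at hl
    | succ n ih =>
      intro l hl hne
      obtain ⟨x, xs, rfl⟩ : ∃ x xs, l = x :: xs := by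
        cases l
        · exact absurd rfl hne
        · exact ⟨_, _, rfl⟩
      obtain ⟨c1, r, hgrp⟩ : ∃ c1 r, pvGrp g tol x xs = (c1, r) := ⟨_, _, rfl⟩
      have h0 : c1 ++ r = xs := by
        have := pvGrp_append g tol x xs
        rw [hgrp] at this
        exact this
      have hur : (x :: c1) ++ r = x :: xs := by
        rw [List.cons_append, h0]
      have hadj : ∀ (i : Nat) (h : i + 1 < (x :: c1).length),
          |g ((x :: c1)[i + 1]'h) - g ((x :: c1)[i]'(by omega))| ≤ tol := by
        intro i h
        have := pvGrp_adjacent g tol x xs i (by rw [hgrp]; exact h)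
        simpa [hgrp] using this
      have hbd : ∀ (y : Int) (ys : List Int), r = y :: ys →
          ¬ |g y - g ((x :: c1).getLast (by simp))| ≤ tol := by
        intro y ys hr
        have := pvGrp_boundary g tol x xs y ys (by rw [hgrp, hr])
        simpa [hgrp] using this
      have hspec : pvSpec g tol (x :: xs) = (x :: c1) :: pvSpec g tol r := by
        rw [pvSpec, hgrp]
      rw [hspec, ← hur]
      rw [pvCutsDecomp g tol (x :: c1) r (by simp) hadj hbd]
      cases r with
      | nil =>
        rw [List.append_nil, if_pos rfl]
        have hsl0 : PySem.List.slice (x :: c1) (some 0)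
            (some (((x :: c1).length : Nat) : Int)) = x :: c1 := by
          rw [PySem.List.slice_zero_start, PySem.List.slice_to_natCast]
          exact List.take_length
        unfold pvPart
        simp only [List.nil_append, List.foldl_cons, List.foldl_nil, hsl0]
        simp [pvSpec]
      | cons y ys =>
        unfold pvPart
        rw [if_neg (by simp)]
        rw [show ((((x :: c1).length : Int)) :: (pvCuts g tol (y :: ys)).map
              (· + ((x :: c1).length : Int)))
              ++ [((((x :: c1) ++ y :: ys)).length : Int)]
            = (((x :: c1).length : Int)) :: ((pvCuts g tol (y :: ys)).map
              (· + ((x :: c1).length : Int))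
              ++ [((((x :: c1) ++ y :: ys)).length : Int)]) from rfl]
        rw [List.foldl_cons]
        have hsl : PySem.List.slice ((x :: c1) ++ y :: ys) (some 0)
            (some (((x :: c1).length : Nat) : Int)) = (x :: c1) := by
          rw [PySem.List.slice_zero_start, PySem.List.slice_to_natCast, List.take_left]
        have hlen2 : ((((x :: c1) ++ y :: ys)).length : Int)
            = ((y :: ys).length : Int) + ((x :: c1).length : Int) := by
          push_cast [List.length_append]; ring
        simp only [List.nil_append]
        rw [hsl, hlen2]
        have hmap : ((pvCuts g tol (y :: ys)).map (· + ((x :: c1).length : Int)))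
              ++ [((y :: ys).length : Int) + ((x :: c1).length : Int)]
            = ((pvCuts g tol (y :: ys)) ++ [((y :: ys).length : Int)]).map
                (· + ((x :: c1).length : Int)) := by
          simp
        rw [hmap]
        rw [pvFoldShift0 (x :: c1) (y :: ys) _ ?nn [x :: c1]]
        case nn =>
          intro d hd
          rcases List.mem_append.mp hd with hd | hd
          · have := List.mem_of_mem_filter hd
            rw [PySem.List.mem_pyRange_one] at this
            omega
          · simp at hd
            omega
        rw [pvFoldAcc]
        have hrlen : (y :: ys).length ≤ n := by
          have h1 := pvGrp_snd_length g tol x xs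
          rw [hgrp] at h1
          simp at h1 hl
          simp
          omega
        have := ih (y :: ys) hrlen (by simp)
        unfold pvPart at this
        rw [this]
        simp
  intro l hne
  exact key l.length l le_rfl hne

-- ===== assembly =====

theorem pvMain (g : Int → Int) (tol : Int) (l : List Int) (h : l ≠ []) :
    (let s := (PySem.List.slice l (some 1) none).foldl
        (fun (st : List (List Int) × List Int) idx =>
          if |g idx - g (PySem.List.pyGetD st.2 (-1) 0)| ≤ tol
          then (st.1, st.2 ++ [idx])
          else (st.1 ++ [st.2], [idx]))
        (([] : List (List Int)), [PySem.List.pyGetD l 0 0]);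
     s.1 ++ [s.2])
    = pvPart l (pvCuts g tol l) := by
  obtain ⟨x, xs, rfl⟩ : ∃ x xs, l = x :: xs := by
    cases l
    · exact absurd rfl h
    · exact ⟨_, _, rfl⟩
  rw [pvFoldB g tol _ h]
  simp only [PySem.List.slice_from_one, List.tail_cons, PySem.List.pyGetD_zero_cons]
  have := pvFoldA g tol xs [] [x] (by simp)
  simp only [List.getLast_singleton, List.nil_append, List.singleton_append] at this
  rw [this, pvSpec]

-- ===== VERDICT (by name: the statement is the Claim_ definition above) =====
theorem cluster_by_axis_spec : Claim_equal_cluster_by_axis := by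
  intro vals tol _
  show cluster_by_axis vals tol = cluster_by_axis_alt vals tol
  unfold cluster_by_axis cluster_by_axis_alt
  by_cases h : vals = []
  · simp [h]
  simp only [if_neg h]
  have hvl : 0 < vals.length := by
    cases vals with
    | nil => exact absurd rfl h
    | cons a t => exact Nat.succ_pos t.length
  have horder : PySem.List.sorted (PySem.List.pyRange 0 (vals.length : Int) 1)
      (fun i => PySem.List.pyGetD vals i 0) false ≠ [] := by
    rw [Ne, PySem.List.sorted_eq_nil_iff]
    intro heq
    have := PySem.List.length_pyRange_one 0 (vals.length : Int)
    rw [heq] at this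
    simp at this
    omega
  have := pvMain (fun i => PySem.List.pyGetD vals i 0) tol
    (PySem.List.sorted (PySem.List.pyRange 0 (vals.length : Int) 1)
      (fun i => PySem.List.pyGetD vals i 0) false) horder
  simpa [pvPart, pvCuts, pvPred] using this
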